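-- pv_equiv track=rewrite | github.com/hunterkorgel/Advent-of-Code-2019 | day4.py | hasAdjacentRepeat
-- ===== SOURCE A (Python) =====
-- def hasAdjacentRepeat(number):
--     number = str(number)
--     last_digit = None
--     two_digits_ago = None
--     truth = False
--     index = 0
--     for digit in number:
--         if digit == last_digit and not digit == two_digits_ago:
--             if index < len(number) - 1:
--                 if digit != number[index + 1]:
--                     return True
--             else:
--                 return True
--         two_digits_ago = last_digit
--         last_digit = digit
--         index += 1
--     return False
-- ===== SOURCE B (Python) =====
-- def hasAdjacentRepeat(number):
--     s = str(number)
--     while s: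
--         run = 1
--         while run < len(s) and s[run] == s[0]:
--             run += 1
--         if run == 2:
--             return True
--         s = s[run:]
--     return False
-- ===== Notes on version B (the rewrite author's own statement) =====
-- stated objective: simpler
-- what changed: B groups the digit string into maximal runs of equal characters with a two-pointer scan and returns True iff some run has length exactly two, replacing A's last_digit/two_digits_ago/index lookahead bookkeeping.
import Mathlib
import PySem

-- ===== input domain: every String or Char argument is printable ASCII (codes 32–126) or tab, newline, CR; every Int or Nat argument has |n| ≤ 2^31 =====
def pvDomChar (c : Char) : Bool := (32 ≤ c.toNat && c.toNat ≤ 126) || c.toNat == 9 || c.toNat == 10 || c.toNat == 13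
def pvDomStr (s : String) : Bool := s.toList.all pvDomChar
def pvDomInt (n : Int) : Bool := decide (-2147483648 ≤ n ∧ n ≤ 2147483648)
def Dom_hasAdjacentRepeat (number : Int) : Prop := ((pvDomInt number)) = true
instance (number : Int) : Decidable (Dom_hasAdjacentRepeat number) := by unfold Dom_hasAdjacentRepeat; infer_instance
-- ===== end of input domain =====

-- B replaces A's last_digit/two_digits_ago/lookahead bookkeeping by a maximal-run scan
-- (return True iff some run of equal digits has length exactly two); same O(d) cost, simpler.

-- ===== PORT A =====
-- Literal port of A's for-loop: state (last_digit, two_digits_ago, index), the full digit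
-- list kept for the `number[index + 1]` lookahead (ported as pyGet?; it is in range whenever
-- the branch is reached, so the `none` arm — unreachable — continues the loop).
def pvLoopA (full : List Char) : List Char → Option Char → Option Char → Int → Bool
  | [], _, _, _ => false
  | d :: rest, last, two, idx =>
      if (some d == last) && !(some d == two) then
        if idx < (full.length : Int) - 1 then
          if !(PySem.List.pyGet? full (idx + 1) == some d) then
            true
          else
            pvLoopA full rest (some d) last (idx + 1)
        else true
      else pvLoopA full rest (some d) last (idx + 1)

def hasAdjacentRepeat (number : Int) : Bool :=
  let s := (PySem.Int.toStr number).toList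
  pvLoopA s s none none 0

-- ===== PORT B =====
-- Source B's outer while: measure the leading run (inner while = takeWhile count), succeed on
-- run = 2, otherwise drop the run (s = s[run:]) and continue.
def pvLoopB : List Char → Bool
  | [] => false
  | c :: rest =>
      let run := (rest.takeWhile (· == c)).length + 1
      if run = 2 then true
      else pvLoopB (rest.dropWhile (· == c))
termination_by s => s.length
decreasing_by
  simp only [List.length_cons]
  exact Nat.lt_succ_of_le (List.length_dropWhile_le _ rest)

def hasAdjacentRepeat_alt (number : Int) : Bool :=
  pvLoopB (PySem.Int.toStr number).toList

-- ===== PRECONDITION & SPEC =====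
def Spec_hasAdjacentRepeat (number : Int) (out : Bool) : Prop := out = hasAdjacentRepeat_alt number
instance (number : Int) (out : Bool) : Decidable (Spec_hasAdjacentRepeat number out) := by unfold Spec_hasAdjacentRepeat; infer_instance

-- ===== CLAIM (what is proved, stated in full; the proofs are below) =====
def Claim_equal_hasAdjacentRepeat : Prop := ∀ (number : Int), Dom_hasAdjacentRepeat number → Spec_hasAdjacentRepeat number (hasAdjacentRepeat number)

-- ===== LEMMAS AND PROOFS =====

-- A's loop with the positional lookahead replaced by the head of the remaining list.
def pvScan : List Char → Option Char → Option Char → Bool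
  | [], _, _ => false
  | d :: rest, last, two =>
      if (some d == last) && !(some d == two) then
        if rest.head? == some d then pvScan rest (some d) last
        else true
      else pvScan rest (some d) last

lemma pvLoopA_eq_scan : ∀ (rest taken : List Char) (last two : Option Char),
    pvLoopA (taken ++ rest) rest last two (taken.length : Int) = pvScan rest last two := by
  intro rest
  induction rest with
  | nil => intro taken last two; rfl
  | cons d rest' ih =>
    intro taken last two
    have hfull : taken ++ d :: rest' = (taken ++ [d]) ++ rest' := by simp
    have hidx : (taken.length : Int) + 1 = (((taken ++ [d]).length : Nat) : Int) := by
      simp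
    have hrec : pvLoopA (taken ++ d :: rest') rest' (some d) last ((taken.length : Int) + 1)
        = pvScan rest' (some d) last := by
      rw [hfull, hidx]; exact ih (taken ++ [d]) (some d) last
    rw [pvLoopA, pvScan]
    by_cases hc : ((some d == last) && !(some d == two)) = true
    · rw [if_pos hc, if_pos hc]
      cases rest' with
      | nil =>
        have hlt : ¬ ((taken.length : Int) < ((taken ++ [d]).length : Int) - 1) := by
          simp
        rw [if_neg (by simpa using hlt)]
        rfl
      | cons e rest'' =>
        have hlt : (taken.length : Int) < ((taken ++ d :: e :: rest'').length : Int) - 1 := by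
          simp
          omega
        rw [if_pos hlt]
        have hget : PySem.List.pyGet? (taken ++ d :: e :: rest'') ((taken.length : Int) + 1)
            = some e := by
          have h1 : (taken.length : Int) + 1 = (taken.length : Int) + ((1 : Nat) : Int) := by simp
          rw [h1, PySem.List.pyGet?_append_right]
          rfl
        rw [hget, List.head?_cons]
        by_cases he : (some e == some d) = true
        · rw [if_pos he]
          have : (!(some e == some d)) = false := by rw [he]; rfl
          rw [this]
          simp only [Bool.false_eq_true, if_false]
          exact hrec
        · have hne : (some e == some d) = false := by
            cases h : (some e == some d) <;> simp_all
          rw [hne]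
          simp
        -- note: when e ≠ d both sides are `true`
    · rw [if_neg hc, if_neg hc]
      exact hrec

-- Joint run lemma: (1) from a state whose last digit differs from the next character, pvScan
-- computes pvLoopB of the remaining list; (2) inside a run of c's already of length ≥ 2,
-- pvScan skips the rest of the run.
lemma pvScan_joint : ∀ n : Nat,
    (∀ (c : Char) (rest : List Char) (last two : Option Char), (c :: rest).length ≤ n →
      last ≠ some c → pvScan (c :: rest) last two = pvLoopB (c :: rest)) ∧
    (∀ (u : List Char) (c : Char), u.length ≤ n →
      pvScan u (some c) (some c) = pvLoopB (u.dropWhile (· == c))) := by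
  intro n
  induction n using Nat.strong_induction_on with
  | _ n ih =>
    have h1 : ∀ (c : Char) (rest : List Char) (last two : Option Char), (c :: rest).length ≤ n →
        last ≠ some c → pvScan (c :: rest) last two = pvLoopB (c :: rest) := by
      intro c rest last two hlen hlast
      have hcond : (some c == last) = false := by
        cases last with
        | none => rfl
        | some x =>
          cases h : (some c == some x)
          · rfl
          · exact absurd (by simpa using h : c = x) (fun hcx => hlast (by rw [hcx]))
      rw [pvScan, hcond]
      simp only [Bool.false_and, Bool.false_eq_true, if_false]
      cases rest with
      | nil =>
        rw [pvScan]
        simp [pvLoopB]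
      | cons d rest' =>
        by_cases hdc : d = c
        · subst hdc
          -- second char equals first: pvScan fires the "pair" test
          rw [pvScan]
          have hcc : ((some d == some d) && !(some d == last)) = true := by
            have h2 : (some d == last) = false := hcond
            rw [h2]; simp
          rw [hcc, if_pos rfl]
          cases rest' with
          | nil => simp [pvLoopB]
          | cons e rest'' =>
            by_cases hed : e = d
            · subst hed
              -- run length ≥ 3: skip the run, and pvLoopB's run ≠ 2
              rw [List.head?_cons]
              have heq : (some e == some e) = true := by simp
              rw [if_pos heq]
              have hskip := (ih (n - 1) (by simp at hlen; omega)).2 (e :: rest'') e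
                (by simp at hlen ⊢; omega)
              rw [hskip]
              conv_rhs => rw [pvLoopB]
              have hrun : ((e :: e :: rest'').takeWhile (· == e)).length + 1 ≠ 2 := by
                simp
              rw [if_neg hrun]
              congr 1
              simp [List.dropWhile_cons]
            · -- run of exactly 2: both sides return true
              rw [List.head?_cons]
              have hne : (some e == some d) = false := by
                cases h : (some e == some d)
                · rfl
                · exact absurd (by simpa using h : e = d) hed
              rw [hne]
              simp only [Bool.false_eq_true, if_false]
              conv_rhs => rw [pvLoopB]
              have hrun : ((d :: e :: rest'').takeWhile (· == d)).length + 1 = 2 := by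
                simp [List.takeWhile_cons, hed]
              rw [if_pos hrun]
        · -- run of length 1: drop it on both sides
          have hrec := (ih (n - 1) (by simp at hlen; omega)).1 d rest' (some c) last
            (by simp at hlen ⊢; omega)
            (by intro h; exact hdc (Option.some.inj h).symm)
          rw [pvScan] at hrec ⊢
          have hne : (some d == some c) = false := by
            cases h : (some d == some c)
            · rfl
            · exact absurd (by simpa using h : d = c) hdc
          rw [hne] at hrec ⊢
          simp only [Bool.false_and, Bool.false_eq_true, if_false] at hrec ⊢
          rw [hrec]
          conv_rhs => rw [pvLoopB]
          have hrun : ((d :: rest').takeWhile (· == c)).length + 1 ≠ 2 := by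
            simp [List.takeWhile_cons, hdc]
          rw [if_neg hrun]
          congr 1
          simp [List.dropWhile_cons, hdc]
    refine ⟨h1, ?_⟩
    intro u c hlen
    cases u with
    | nil => simp [pvScan, pvLoopB]
    | cons d u' =>
      by_cases hdc : d = c
      · subst hdc
        rw [pvScan]
        have hcf : ((some d == some d) && !(some d == some d)) = false := by simp
        rw [hcf]
        simp only [Bool.false_eq_true, if_false]
        rw [(ih (n - 1) (by simp at hlen; omega)).2 u' d (by simp at hlen ⊢; omega)]
        congr 1
        simp [List.dropWhile_cons]
      · rw [h1 d u' (some c) (some c) hlen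
          (by intro h; exact hdc (Option.some.inj h).symm)]
        congr 1
        simp [List.dropWhile_cons, hdc]

lemma pvScan_eq_loopB (s : List Char) : pvScan s none none = pvLoopB s := by
  cases s with
  | nil => simp [pvScan, pvLoopB]
  | cons c rest =>
    exact (pvScan_joint (c :: rest).length).1 c rest none none le_rfl (by simp)

-- ===== VERDICT (by name: the statement is the Claim_ definition above) =====
theorem hasAdjacentRepeat_spec : Claim_equal_hasAdjacentRepeat := by
  intro number _
  unfold Spec_hasAdjacentRepeat hasAdjacentRepeat hasAdjacentRepeat_alt
  have h := pvLoopA_eq_scan (PySem.Int.toStr number).toList [] none none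
  simp only [List.nil_append, List.length_nil, Int.natCast_zero] at h
  rw [h, pvScan_eq_loopB]
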